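-- pv_equiv track=rewrite | github.com/AgenciaComunica/MetaAdsReport | project/empresas/services.py | strip_empresa_legacy_digital_notes
-- ===== SOURCE A (Python) =====
-- LEGACY_DIGITAL_NOTE_MARKERS = (
--     'Instagram da empresa:',
--     'Meta Ads Library:',
--     'Busca usada:',
--     'Ads ativos encontrados:',
-- )
--
-- def strip_empresa_legacy_digital_notes(text):
--     raw_text = (text or '').strip()
--     if not raw_text:
--         return ''
--
--     cleaned_lines = []
--     for line in raw_text.splitlines():
--         normalized = line.strip()
--         if not normalized:
--             if cleaned_lines and cleaned_lines[-1]: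
--                 cleaned_lines.append('')
--             continue
--         if any(normalized.startswith(marker) for marker in LEGACY_DIGITAL_NOTE_MARKERS):
--             continue
--         cleaned_lines.append(line)
--
--     while cleaned_lines and not cleaned_lines[-1].strip():
--         cleaned_lines.pop()
--     return '\n'.join(cleaned_lines).strip()
-- ===== SOURCE B (Python) =====
-- LEGACY_DIGITAL_NOTE_MARKERS = (
--     'Instagram da empresa:',
--     'Meta Ads Library:',
--     'Busca usada:',
--     'Ads ativos encontrados:',
-- )
--
-- def strip_empresa_legacy_digital_notes(text):
--     # Group kept lines into paragraphs; blank runs are paragraph breaks,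
--     # marker lines vanish without breaking a paragraph.
--     paragraphs = []
--     current = []
--     for line in (text or '').strip().splitlines():
--         s = line.strip()
--         if not s:
--             if current:
--                 paragraphs.append(current)
--                 current = []
--         elif not s.startswith(LEGACY_DIGITAL_NOTE_MARKERS):
--             current.append(line)
--     if current:
--         paragraphs.append(current)
--     return '\n\n'.join('\n'.join(p) for p in paragraphs).strip()
-- ===== Notes on version B (the rewrite author's own statement) =====
-- stated objective: alternative
-- what changed: B groups the kept lines into paragraphs (a blank run flushes the current paragraph, marker lines vanish) and joins the paragraphs with a blank separator line, replacing A's eager blank-line insertion guarded by the last kept line plus the trailing pop-while loop.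
import Mathlib
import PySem

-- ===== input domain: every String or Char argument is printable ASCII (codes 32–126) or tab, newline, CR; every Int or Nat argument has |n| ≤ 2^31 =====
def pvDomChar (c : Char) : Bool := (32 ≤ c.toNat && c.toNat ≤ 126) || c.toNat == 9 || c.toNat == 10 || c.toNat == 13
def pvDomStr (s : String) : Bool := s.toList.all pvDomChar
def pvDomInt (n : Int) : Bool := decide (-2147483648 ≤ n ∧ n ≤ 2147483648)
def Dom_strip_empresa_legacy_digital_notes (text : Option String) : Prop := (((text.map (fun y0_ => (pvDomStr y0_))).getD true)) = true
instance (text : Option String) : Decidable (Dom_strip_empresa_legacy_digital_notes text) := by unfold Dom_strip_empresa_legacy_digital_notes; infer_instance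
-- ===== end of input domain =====

-- B regroups the text into paragraphs (blank runs break, marker lines vanish) instead of
-- A's eager blank insertion plus trailing pop loop; same return value, objective: alternative.

-- ===== PORT A =====
-- module constant LEGACY_DIGITAL_NOTE_MARKERS (shared by A and B, as in the Python files)
def pvMarkers : List (List Char) :=
  ["Instagram da empresa:".toList, "Meta Ads Library:".toList,
   "Busca usada:".toList, "Ads ativos encontrados:".toList]

-- A's loop body: blank line → append '' iff last kept line truthy; marker → skip; else keep verbatim
def pvAStep (acc : List (List Char)) (line : List Char) : List (List Char) :=
  let normalized := PySem.Chars.strip line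
  if normalized = [] then
    (match acc.getLast? with
     | some (_ :: _) => acc ++ [[]]
     | _ => acc)
  else if pvMarkers.any (fun m => PySem.Chars.startswith normalized m) then acc
  else acc ++ [line]

-- A's 'while cleaned_lines and not cleaned_lines[-1].strip(): cleaned_lines.pop()'
def pvPop (l : List (List Char)) : List (List Char) :=
  match h : l.getLast? with
  | some last =>
      if PySem.Chars.strip last = [] then pvPop l.dropLast else l
  | none => l
termination_by l.length
decreasing_by
  have hne : l ≠ [] := by rintro rfl; simp at h
  have := List.length_pos_iff.mpr hne
  simp [List.length_dropLast]; omega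

def strip_empresa_legacy_digital_notes (text : Option String) : String :=
  let raw := PySem.Chars.strip (text.getD "").toList
  if raw = [] then ""
  else
    let cleaned := (PySem.Chars.splitlines raw).foldl pvAStep []
    String.ofList (PySem.Chars.strip (PySem.Chars.join ['\n'] (pvPop cleaned)))

-- ===== PORT B =====
-- B's loop body: blank line → flush current paragraph; non-marker line → extend it
def pvBStep (st : List (List (List Char)) × List (List Char)) (line : List Char) :
    List (List (List Char)) × List (List Char) :=
  let s := PySem.Chars.strip line
  if s = [] then
    if st.2 ≠ [] then (st.1 ++ [st.2], []) else st
  else if ¬ (pvMarkers.any (fun m => PySem.Chars.startswith s m)) then (st.1, st.2 ++ [line])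
  else st

def strip_empresa_legacy_digital_notes_alt (text : Option String) : String :=
  let st := (PySem.Chars.splitlines (PySem.Chars.strip (text.getD "").toList)).foldl pvBStep ([], [])
  let pars := if st.2 ≠ [] then st.1 ++ [st.2] else st.1
  String.ofList (PySem.Chars.strip
    (PySem.Chars.join ['\n', '\n'] (pars.map (PySem.Chars.join ['\n']))))

-- ===== PRECONDITION & SPEC =====
def Spec_strip_empresa_legacy_digital_notes (text : Option String) (out : String) : Prop := out = strip_empresa_legacy_digital_notes_alt text
instance (text : Option String) (out : String) : Decidable (Spec_strip_empresa_legacy_digital_notes text out) := by unfold Spec_strip_empresa_legacy_digital_notes; infer_instance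

-- ===== CLAIM (what is proved, stated in full; the proofs are below) =====
def Claim_equal_strip_empresa_legacy_digital_notes : Prop := ∀ (text : Option String), Dom_strip_empresa_legacy_digital_notes text → Spec_strip_empresa_legacy_digital_notes text (strip_empresa_legacy_digital_notes text)

-- ===== LEMMAS AND PROOFS =====

-- A's list of kept lines, expressed from B's state: every closed paragraph followed by ''
def pvF (pars : List (List (List Char))) : List (List Char) := pars.flatMap (· ++ [[]])

def pvInv (pars : List (List (List Char))) (cur : List (List Char)) : Prop :=
  (∀ p ∈ pars, p ≠ [] ∧ ∀ l ∈ p, PySem.Chars.strip l ≠ []) ∧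
  (∀ l ∈ cur, PySem.Chars.strip l ≠ [])

lemma pvF_concat (pars : List (List (List Char))) (p : List (List Char)) :
    pvF (pars ++ [p]) = pvF pars ++ (p ++ [[]]) := by
  simp [pvF]

lemma pvF_getLast? (pars : List (List (List Char))) (h : pars ≠ []) :
    (pvF pars).getLast? = some [] := by
  obtain ⟨init, p, h1⟩ := List.eq_nil_or_concat pars |>.resolve_left h
  rw [h1, List.concat_eq_append, pvF_concat, ← List.append_assoc, List.getLast?_concat]

lemma pv_strip_ne_nil {l : List Char} (h : PySem.Chars.strip l ≠ []) : l ≠ [] := by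
  rintro rfl; exact h rfl

-- loop invariant: A's fold state is pvF of B's fold state, and pvInv is preserved
lemma pv_loop (lines : List (List Char)) :
    ∀ pars cur, pvInv pars cur →
      lines.foldl pvAStep (pvF pars ++ cur)
        = pvF (lines.foldl pvBStep (pars, cur)).1 ++ (lines.foldl pvBStep (pars, cur)).2
      ∧ pvInv (lines.foldl pvBStep (pars, cur)).1 (lines.foldl pvBStep (pars, cur)).2 := by
  induction lines with
  | nil => intro pars cur h; exact ⟨rfl, h⟩
  | cons line rest ih =>
    intro pars cur h
    obtain ⟨hpars, hcur⟩ := h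
    by_cases hb : PySem.Chars.strip line = []
    · -- blank line
      cases hc : cur with
      | nil =>
        subst hc
        have hA : pvAStep (pvF pars ++ []) line = pvF pars ++ [] := by
          cases hp : pars with
          | nil => simp [pvAStep, hb, pvF]
          | cons q qs =>
            subst hp
            have hlast := pvF_getLast? (q :: qs) (by simp)
            simp [pvAStep, hb, hlast]
        have hB : pvBStep (pars, []) line = (pars, []) := by
          simp [pvBStep, hb]
        rw [List.foldl_cons, List.foldl_cons, hA, hB]
        exact ih pars [] ⟨hpars, by simp⟩
      | cons c cs =>
        subst hc
        have hane : (c :: cs).getLast (by simp) ≠ [] :=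
          pv_strip_ne_nil (hcur _ (List.getLast_mem _))
        have hga : (pvF pars ++ c :: cs).getLast? = some ((c :: cs).getLast (by simp)) := by
          rw [List.getLast?_append, List.getLast?_eq_some_getLast (l := c :: cs) (by simp)]
          rfl
        have hA : pvAStep (pvF pars ++ c :: cs) line = pvF (pars ++ [c :: cs]) ++ [] := by
          rw [pvF_concat]
          cases hgl : (c :: cs).getLast (by simp) with
          | nil => exact absurd hgl hane
          | cons x xs =>
            rw [hgl] at hga
            simp [pvAStep, hb, hga]
        have hB : pvBStep (pars, c :: cs) line = (pars ++ [c :: cs], []) := by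
          simp [pvBStep, hb]
        rw [List.foldl_cons, List.foldl_cons, hA, hB]
        refine ih (pars ++ [c :: cs]) [] ⟨?_, by simp⟩
        intro p hp
        rcases List.mem_append.mp hp with hp | hp
        · exact hpars p hp
        · simp only [List.mem_singleton] at hp
          subst hp
          exact ⟨by simp, hcur⟩
    · by_cases hm : pvMarkers.any (fun m => PySem.Chars.startswith (PySem.Chars.strip line) m) = true
      · -- marker line: both states unchanged
        have hA : pvAStep (pvF pars ++ cur) line = pvF pars ++ cur := by
          simp [pvAStep, hb, hm]
        have hB : pvBStep (pars, cur) line = (pars, cur) := by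
          simp [pvBStep, hb, hm]
        rw [List.foldl_cons, List.foldl_cons, hA, hB]
        exact ih pars cur ⟨hpars, hcur⟩
      · -- kept line
        have hA : pvAStep (pvF pars ++ cur) line = pvF pars ++ (cur ++ [line]) := by
          simp [pvAStep, hb, hm]
        have hB : pvBStep (pars, cur) line = (pars, cur ++ [line]) := by
          simp [pvBStep, hb, hm]
        rw [List.foldl_cons, List.foldl_cons, hA, hB]
        refine ih pars (cur ++ [line]) ⟨hpars, ?_⟩
        intro l hl
        rcases List.mem_append.mp hl with hl | hl
        · exact hcur l hl
        · simp only [List.mem_singleton] at hl; subst hl; exact hb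

lemma pvPop_stop (l : List (List Char))
    (h : l.getLast? = none ∨ ∃ a, l.getLast? = some a ∧ PySem.Chars.strip a ≠ []) :
    pvPop l = l := by
  rcases h with h | ⟨a, ha, hs⟩
  · rw [pvPop, h]
  · rw [pvPop, ha]; simp [hs]

lemma pvPop_concat_nil (xs : List (List Char)) : pvPop (xs ++ [[]]) = pvPop xs := by
  rw [pvPop, List.getLast?_concat]
  simp [show PySem.Chars.strip ([] : List Char) = [] from rfl]

-- sep-join over two nonempty part lists splits at the boundary
lemma pv_join_append (sep : List Char) (a b : List (List Char)) (ha : a ≠ []) (hb : b ≠ []) :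
    PySem.Chars.join sep (a ++ b) = PySem.Chars.join sep a ++ sep ++ PySem.Chars.join sep b := by
  induction a with
  | nil => exact absurd rfl ha
  | cons x xs ih =>
    cases xs with
    | nil =>
      cases b with
      | nil => exact absurd rfl hb
      | cons y ys => simp [PySem.Chars.join_cons_cons]
    | cons x' xs' =>
      rw [show (x :: x' :: xs') ++ b = x :: x' :: (xs' ++ b) from rfl,
          PySem.Chars.join_cons_cons, PySem.Chars.join_cons_cons sep x x' xs',
          show x' :: (xs' ++ b) = (x' :: xs') ++ b from rfl, ih (by simp)]
      simp [List.append_assoc]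

-- join with single-newline over the ''-separated flat list = double-newline over joined paragraphs
lemma pv_join_eq (pars : List (List (List Char))) (p : List (List Char))
    (hpars : ∀ q ∈ pars, q ≠ []) (hp : p ≠ []) :
    PySem.Chars.join ['\n'] (pvF pars ++ p)
      = PySem.Chars.join ['\n', '\n'] ((pars ++ [p]).map (PySem.Chars.join ['\n'])) := by
  induction pars with
  | nil => simp [pvF, PySem.Chars.join_singleton]
  | cons q qs ih =>
    have hq : q ≠ [] := hpars q (by simp)
    have hrest : pvF qs ++ p ≠ [] := by
      intro h; exact hp (List.append_eq_nil_iff.mp h).2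
    have hL : pvF (q :: qs) ++ p = (q ++ [[]]) ++ (pvF qs ++ p) := by
      simp [pvF]
    rw [hL, pv_join_append _ _ _ (by simp) hrest,
        pv_join_append _ q [[]] hq (by simp), PySem.Chars.join_singleton,
        ih (fun r hr => hpars r (by simp [hr]))]
    rw [show ((q :: qs) ++ [p]).map (PySem.Chars.join ['\n'])
          = [PySem.Chars.join ['\n'] q] ++ (qs ++ [p]).map (PySem.Chars.join ['\n']) from by simp,
        pv_join_append _ _ _ (by simp) (by simp), PySem.Chars.join_singleton]
    simp [List.append_assoc]

-- ===== VERDICT (by name: the statement is the Claim_ definition above) =====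
theorem strip_empresa_legacy_digital_notes_spec : Claim_equal_strip_empresa_legacy_digital_notes := by
  intro text _
  show strip_empresa_legacy_digital_notes text = strip_empresa_legacy_digital_notes_alt text
  unfold strip_empresa_legacy_digital_notes strip_empresa_legacy_digital_notes_alt
  by_cases hraw : PySem.Chars.strip (text.getD "").toList = []
  · simp only [hraw]
    rfl
  · rw [if_neg hraw]
    obtain ⟨heq, hinv⟩ := pv_loop (PySem.Chars.splitlines (PySem.Chars.strip (text.getD "").toList))
      [] [] ⟨by simp, by simp⟩
    rw [show pvF [] ++ ([] : List (List Char)) = [] from rfl] at heq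
    set st := (PySem.Chars.splitlines (PySem.Chars.strip (text.getD "").toList)).foldl pvBStep ([], []) with hst
    obtain ⟨hpars, hcur⟩ := hinv
    rw [heq]
    show String.ofList (PySem.Chars.strip (PySem.Chars.join ['\n'] (pvPop (pvF st.1 ++ st.2))))
        = String.ofList (PySem.Chars.strip (PySem.Chars.join ['\n', '\n']
            (List.map (PySem.Chars.join ['\n']) (if st.2 ≠ [] then st.1 ++ [st.2] else st.1))))
    by_cases h2 : st.2 = []
    · rw [if_neg (by simp [h2])]
      rcases List.eq_nil_or_concat st.1 with h1 | ⟨init, p, h1⟩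
      · rw [h1, h2]
        simp [pvF, pvPop_stop [] (Or.inl rfl)]
      · rw [List.concat_eq_append] at h1
        have hpne : p ≠ [] := (hpars p (by simp [h1])).1
        have ha : p.getLast? = some (p.getLast hpne) := List.getLast?_eq_some_getLast hpne
        have has : PySem.Chars.strip (p.getLast hpne) ≠ [] :=
          (hpars p (by simp [h1])).2 _ (List.getLast_mem _)
        rw [h1, h2, List.append_nil, pvF_concat,
            show pvF init ++ (p ++ [[]]) = (pvF init ++ p) ++ [[]] from by simp,
            pvPop_concat_nil,
            pvPop_stop _ (Or.inr ⟨_, by rw [List.getLast?_append, ha]; rfl, has⟩),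
            pv_join_eq init p (fun q hq => (hpars q (by simp [h1, hq])).1) hpne]
    · have ha : st.2.getLast? = some (st.2.getLast h2) := List.getLast?_eq_some_getLast h2
      have hlast : (pvF st.1 ++ st.2).getLast? = some (st.2.getLast h2) := by
        rw [List.getLast?_append, ha]; rfl
      rw [pvPop_stop _ (Or.inr ⟨_, hlast, hcur _ (List.getLast_mem _)⟩), if_pos h2,
          pv_join_eq st.1 st.2 (fun q hq => (hpars q hq).1) h2]
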